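-- pv_equiv track=rewrite | github.com/JagjeetSonwalkar/python_practice | Problem solving/String6.py | findSubStringPalindrom
-- ===== SOURCE A (Python) =====
-- def findSubStringPalindrom(getString):
--     # check palindrom
--     def isPalindrome(getString):
--         orginalString = getString
--         reverseString = getString[::-1]
--         return orginalString == reverseString
--
--     # remove first & last Char
--     def removeFirstLastChar(getString):
--         newString = ""
--         for i in range(1,len(getString)-1,1):
--             newString += getString[i]
--         return newString
--
--     orginalString = getString
--     subStringPalindromList = []
--
--     while(len(orginalString) >= 2):
--         if isPalindrome(getString) == True:
--             subStringPalindromList.append(orginalString)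
--         orginalString = removeFirstLastChar(orginalString)
--
--     return subStringPalindromList
-- ===== SOURCE B (Python) =====
-- def findSubStringPalindrom(getString):
--     if getString != getString[::-1]:
--         return []
--     n = len(getString)
--     return [getString[i:n - i] for i in range((n - 2) // 2 + 1)]
-- ===== Notes on version B (the rewrite author's own statement) =====
-- stated objective: faster
-- what changed: Tests palindromicity once up front and builds the result by direct symmetric slicing s[i:n-i] over a computed index range, instead of repeatedly rebuilding the trimmed string character-by-character and re-checking the palindrome test each iteration.
import Mathlib
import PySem

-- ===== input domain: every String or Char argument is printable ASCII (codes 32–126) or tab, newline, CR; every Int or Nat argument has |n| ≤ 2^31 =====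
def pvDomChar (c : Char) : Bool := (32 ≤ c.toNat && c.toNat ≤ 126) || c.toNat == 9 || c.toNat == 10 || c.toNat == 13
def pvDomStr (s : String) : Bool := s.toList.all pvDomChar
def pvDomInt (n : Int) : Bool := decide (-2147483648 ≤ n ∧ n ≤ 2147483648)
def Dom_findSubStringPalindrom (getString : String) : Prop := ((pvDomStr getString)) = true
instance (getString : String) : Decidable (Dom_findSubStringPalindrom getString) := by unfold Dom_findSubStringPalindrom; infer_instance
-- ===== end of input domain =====

-- B replaces A's per-iteration character-by-character trimming and repeated palindrome test by one
-- up-front palindrome test and direct symmetric slicing s[i:n-i]; measured faster (constant factor).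
-- ===== PORT A =====
-- isPalindrome: getString == getString[::-1]  (s[::-1] is reversal: PySem.List.slice?_none_none_neg_one)
def pvIsPalindrome (getString : List Char) : Bool :=
  getString == getString.reverse

-- removeFirstLastChar: for i in range(1, len-1): newString += getString[i]
-- (getString[i] is always in range here, so pyGetD is exact)
def pvRemoveFirstLastChar (getString : List Char) : List Char :=
  (PySem.List.pyRange 1 ((getString.length : Int) - 1) 1).foldl
    (fun newString i => newString ++ [PySem.List.pyGetD getString i ' ']) []

-- the while loop needs this fact for termination; cited in decreasing_by
theorem pvRemove_eq (l : List Char) :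
    pvRemoveFirstLastChar l = l.dropLast.drop 1 := by
  unfold pvRemoveFirstLastChar
  rw [PySem.List.foldl_append_singleton_eq_map, List.nil_append]
  rcases List.eq_nil_or_concat l with rfl | ⟨ys, c, rfl⟩
  · rw [PySem.List.pyRange_one_eq_nil (by norm_num)]; rfl
  · simp only [List.concat_eq_append]
    have h2 : (((ys ++ [c]).length : Int)) - 1 = PySem.List.len ((ys ++ [c]).dropLast) := by
      simp [PySem.List.len_eq]
    rw [h2, show List.drop 1 ((ys ++ [c]).dropLast) = List.drop (Int.toNat 1) ((ys ++ [c]).dropLast) from rfl,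
      ← PySem.List.map_pyGetD_pyRange ((ys ++ [c]).dropLast) ' ' (a := 1) (by norm_num)]
    apply List.map_congr_left
    intro i hi
    rw [PySem.List.mem_pyRange_one] at hi
    simp only [PySem.List.len_eq, List.length_dropLast, List.length_append, List.length_cons,
      List.length_nil] at hi
    show PySem.List.pyGetD (ys ++ [c]) i ' ' = PySem.List.pyGetD ((ys ++ [c]).dropLast) i ' '
    rw [PySem.List.pyGetD_of_nonneg _ _ (by omega), PySem.List.pyGetD_of_nonneg _ _ (by omega)]
    have hys : i.toNat < ys.length := by omega
    simp [List.getD_eq_getElem?_getD, List.getElem?_append_left hys]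

def pvWhileLoop (getString : List Char) (orginalString : List Char) : List (List Char) :=
  if h : 2 ≤ orginalString.length then
    (if pvIsPalindrome getString then [orginalString] else []) ++
      pvWhileLoop getString (pvRemoveFirstLastChar orginalString)
  else []
termination_by orginalString.length
decreasing_by
  rw [pvRemove_eq]; simp; omega

def findSubStringPalindrom (getString : String) : List String :=
  (pvWhileLoop getString.toList getString.toList).map String.ofList

-- ===== PORT B =====
def findSubStringPalindrom_alt (getString : String) : List String :=
  let s := getString.toList
  if s ≠ s.reverse then []
  else
    (PySem.List.pyRange 0 (PySem.Int.floordiv ((s.length : Int) - 2) 2 + 1) 1).map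
      (fun i => String.ofList (PySem.List.slice s (some i) (some ((s.length : Int) - i))))

-- ===== PRECONDITION & SPEC =====
def Spec_findSubStringPalindrom (getString : String) (out : List String) : Prop := out = findSubStringPalindrom_alt getString
instance (getString : String) (out : List String) : Decidable (Spec_findSubStringPalindrom getString out) := by unfold Spec_findSubStringPalindrom; infer_instance

-- ===== CLAIM (what is proved, stated in full; the proofs are below) =====
def Claim_equal_findSubStringPalindrom : Prop := ∀ (getString : String), Dom_findSubStringPalindrom getString → Spec_findSubStringPalindrom getString (findSubStringPalindrom getString)

-- ===== LEMMAS AND PROOFS =====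

-- common recursive skeleton: the successive trims of l while length ≥ 2
def pvSpine (l : List Char) : List (List Char) :=
  if h : 2 ≤ l.length then l :: pvSpine (l.dropLast.drop 1) else []
termination_by l.length
decreasing_by simp; omega

theorem pvLoop_pal (g : List Char) (hg : pvIsPalindrome g = true) :
    ∀ l : List Char, pvWhileLoop g l = pvSpine l := by
  intro l
  induction hn : l.length using Nat.strong_induction_on generalizing l with
  | _ n ih =>
    subst hn
    unfold pvWhileLoop pvSpine
    rw [hg]
    split
    · rename_i h
      rw [pvRemove_eq, ih _ (by simp; omega) _ rfl]
      simp
    · rfl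

theorem pvLoop_notpal (g : List Char) (hg : pvIsPalindrome g = false) :
    ∀ l : List Char, pvWhileLoop g l = [] := by
  intro l
  induction hn : l.length using Nat.strong_induction_on generalizing l with
  | _ n ih =>
    subst hn
    unfold pvWhileLoop
    rw [hg]
    split
    · rename_i h
      rw [pvRemove_eq, ih _ (by simp; omega) _ rfl]
      rfl
    · rfl

-- B's slicing loop, on the char-list side
def pvBform (s : List Char) : List (List Char) :=
  (PySem.List.pyRange 0 (PySem.Int.floordiv ((s.length : Int) - 2) 2 + 1) 1).map
    (fun i => PySem.List.slice s (some i) (some ((s.length : Int) - i)))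

theorem pv_take_drop_dropLast (l : List Char) (a t : Nat) (h : t + a + 1 ≤ l.length) :
    (l.dropLast.drop a).take t = (l.drop a).take t := by
  rw [List.dropLast_eq_take, List.drop_take, List.take_take]
  congr 1
  omega

theorem pvBform_nil (l : List Char) (h : l.length < 2) : pvBform l = [] := by
  have hk : PySem.Int.floordiv ((l.length : Int) - 2) 2 + 1 ≤ 0 := by
    have h01 : l.length = 0 ∨ l.length = 1 := by omega
    rcases h01 with h0 | h0 <;> rw [h0] <;> decide
  unfold pvBform
  rw [PySem.List.pyRange_one_eq_nil (by omega)]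
  rfl

theorem pvBform_cons (l : List Char) (h : 2 ≤ l.length) :
    pvBform l = l :: pvBform (l.dropLast.drop 1) := by
  have hfd : PySem.Int.floordiv ((l.length : Int) - 2) 2 = ((l.length : Int) - 2) / 2 :=
    PySem.Int.floordiv_eq_ediv_of_pos (by norm_num)
  have hfd' : PySem.Int.floordiv (((l.dropLast.drop 1).length : Int) - 2) 2
      = (((l.dropLast.drop 1).length : Int) - 2) / 2 :=
    PySem.Int.floordiv_eq_ediv_of_pos (by norm_num)
  have hlen : (((l.dropLast.drop 1).length : Int)) = (l.length : Int) - 2 := by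
    simp; omega
  unfold pvBform
  rw [hfd, hfd', hlen,
      PySem.List.pyRange_one_cons (by omega),
      PySem.List.pyRange_one, PySem.List.pyRange_one]
  simp only [List.map_cons, List.map_map]
  congr 1
  · -- head: l[0:n-0] = l
    rw [show ((l.length : Int) - 0) = ((l.length : Nat) : Int) by ring]
    simp [PySem.List.slice_to_natCast]
  · -- tail: shifted slices of l are the slices of the trimmed list
    have hrange : (((l.length : Int) - 2) / 2 + 1 - (0 + 1)).toNat
        = (((l.length : Int) - 2 - 2) / 2 + 1 - 0).toNat := by omega
    rw [hrange]
    apply List.map_congr_left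
    intro j hj
    rw [List.mem_range] at hj
    have hjn : 2 * (j : Int) + 4 ≤ (l.length : Int) := by omega
    show PySem.List.slice l (some (0 + 1 + (j : Int))) (some ((l.length : Int) - (0 + 1 + (j : Int))))
        = PySem.List.slice (l.dropLast.drop 1) (some (0 + (j : Int)))
            (some ((l.length : Int) - 2 - (0 + (j : Int))))
    rw [show (0 : Int) + 1 + (j : Int) = ((1 + j : Nat) : Int) by omega,
        show ((l.length : Int)) - ((1 + j : Nat) : Int) = ((l.length - 1 - j : Nat) : Int) by omega,
        show (0 : Int) + (j : Int) = ((j : Nat) : Int) by ring,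
        show ((l.length : Int)) - 2 - ((j : Nat) : Int) = ((l.length - 2 - j : Nat) : Int) by omega,
        PySem.List.slice_natCast, PySem.List.slice_natCast,
        List.drop_drop]
    rw [show l.length - 1 - j - (1 + j) = l.length - 2 - 2 * j by omega,
        show l.length - 2 - j - j = l.length - 2 - 2 * j by omega]
    exact (pv_take_drop_dropLast l (1 + j) (l.length - 2 - 2 * j) (by omega)).symm

theorem pvBform_eq_spine : ∀ l : List Char, pvBform l = pvSpine l := by
  intro l
  induction hn : l.length using Nat.strong_induction_on generalizing l with
  | _ n ih =>
    subst hn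
    unfold pvSpine
    split
    · rename_i h
      rw [pvBform_cons l h, ih _ (by simp; omega) _ rfl]
    · rename_i h
      exact pvBform_nil l (by omega)

-- ===== VERDICT (by name: the statement is the Claim_ definition above) =====
theorem findSubStringPalindrom_spec : Claim_equal_findSubStringPalindrom := by
  intro s _
  unfold Spec_findSubStringPalindrom findSubStringPalindrom findSubStringPalindrom_alt
  by_cases hpal : s.toList = s.toList.reverse
  · rw [if_neg (by simpa using hpal),
        pvLoop_pal _ (by simp only [pvIsPalindrome, beq_iff_eq]; exact hpal) _,
        ← pvBform_eq_spine]
    unfold pvBform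
    rw [List.map_map]
    rfl
  · rw [if_pos (by simpa using hpal),
        pvLoop_notpal _ (by simp only [pvIsPalindrome, beq_eq_false_iff_ne, ne_eq]; exact hpal) _]
    rfl
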